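-- pv_equiv track=rewrite | github.com/lanF-cyber/antivirus_program | src/scanbox/reporting/json_report.py | _stable_non_zero_first
-- ===== SOURCE A (Python) =====
-- from typing import Any
--
-- def _stable_non_zero_first(
--     payload: dict[str, Any],
--     ordered_keys: tuple[str, ...],
-- ) -> dict[str, Any]:
--     reordered: dict[str, Any] = {}
--     remaining_keys = [key for key in payload if key not in ordered_keys]
--
--     for key in ordered_keys:
--         if key in payload and payload[key] != 0:
--             reordered[key] = payload[key]
--
--     for key in ordered_keys:
--         if key in payload and payload[key] == 0:
--             reordered[key] = payload[key]
--
--     for key in remaining_keys: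
--         reordered[key] = payload[key]
--
--     return reordered
-- ===== SOURCE B (Python) =====
-- def _stable_non_zero_first(payload, ordered_keys):
--     pos = {}
--     for i, key in enumerate(ordered_keys):
--         pos.setdefault(key, i)
--
--     def rank(item):
--         i, (key, value) = item
--         if key in pos:
--             return (0, pos[key]) if value != 0 else (1, pos[key])
--         return (2, i)
--
--     return dict(kv for _, kv in sorted(enumerate(payload.items()), key=rank))
-- ===== Notes on version B (the rewrite author's own statement) =====
-- stated objective: faster
-- what changed: Replaces A's three directed scans (each doing linear membership tests against ordered_keys / the payload) with one first-index position dict built over ordered_keys plus a single stable sort of the enumerated payload items under an injective (group, position) key.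
import Mathlib
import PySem

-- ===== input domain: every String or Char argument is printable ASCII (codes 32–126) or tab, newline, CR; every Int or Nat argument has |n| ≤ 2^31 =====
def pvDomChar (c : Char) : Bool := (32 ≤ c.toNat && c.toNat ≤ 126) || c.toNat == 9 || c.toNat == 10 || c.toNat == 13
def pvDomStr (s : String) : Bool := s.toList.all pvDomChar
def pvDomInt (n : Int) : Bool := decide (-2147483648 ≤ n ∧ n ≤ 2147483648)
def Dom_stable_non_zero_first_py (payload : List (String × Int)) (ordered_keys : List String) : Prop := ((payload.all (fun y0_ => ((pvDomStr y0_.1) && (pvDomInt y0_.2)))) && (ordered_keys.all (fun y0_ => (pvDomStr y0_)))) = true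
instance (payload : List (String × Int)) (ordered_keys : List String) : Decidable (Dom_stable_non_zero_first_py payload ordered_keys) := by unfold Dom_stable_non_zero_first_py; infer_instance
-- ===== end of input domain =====

-- B replaces A's three directed scans by one first-index map over ordered_keys plus a single
-- sort of the enumerated payload items under an injective (group, position) key: alternative algorithm.

-- ===== PORT A =====
def stable_non_zero_first_py (payload : List (String × Int)) (ordered_keys : List String) : List (String × Int) :=
  let d : PySem.Dict String Int := PySem.Dict.mk payload
  let remaining_keys := d.keys.filter (fun key => !(ordered_keys.contains key))
  let r1 := ordered_keys.foldl
    (fun r key => if d.contains key && d.getD key 0 != 0 then r.insert key (d.getD key 0) else r)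
    PySem.Dict.empty
  let r2 := ordered_keys.foldl
    (fun r key => if d.contains key && d.getD key 0 == 0 then r.insert key (d.getD key 0) else r)
    r1
  let r3 := remaining_keys.foldl (fun r key => r.insert key (d.getD key 0)) r2
  r3.items

-- ===== PORT B =====
def stable_non_zero_first_py_alt (payload : List (String × Int)) (ordered_keys : List String) : List (String × Int) :=
  let pos : PySem.Dict String Int :=
    (PySem.List.enumerate ordered_keys 0).foldl (fun p ik => p.setdefault ik.2 ik.1) PySem.Dict.empty
  let k1 : Int × (String × Int) → Int := fun item =>
    if pos.contains item.2.1 then (if item.2.2 != 0 then 0 else 1) else 2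
  let k2 : Int × (String × Int) → Int := fun item =>
    if pos.contains item.2.1 then pos.getD item.2.1 0 else item.1
  (PySem.Dict.ofList
    ((PySem.List.sorted2 (PySem.List.enumerate payload 0) k1 k2).map (fun x => x.2))).items

-- ===== PRECONDITION & SPEC =====
-- Pre_ excludes association lists with duplicate keys: 'payload' is a Python dict, whose items
-- list always has distinct keys, so a duplicate-key list corresponds to no actual input of A.
def Pre_stable_non_zero_first_py (payload : List (String × Int)) (ordered_keys : List String) : Prop :=
  (payload.map Prod.fst).Nodup
instance (payload : List (String × Int)) (ordered_keys : List String) : Decidable (Pre_stable_non_zero_first_py payload ordered_keys) := by unfold Pre_stable_non_zero_first_py; infer_instance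
def pvWitness_stable_non_zero_first_py : (List (String × Int)) × List String :=
  ([("a", 1), ("b", 0), ("c", 7)], ["b", "a", "x"])
def Spec_stable_non_zero_first_py (payload : List (String × Int)) (ordered_keys : List String) (out : List (String × Int)) : Prop := out = stable_non_zero_first_py_alt payload ordered_keys
instance (payload : List (String × Int)) (ordered_keys : List String) (out : List (String × Int)) : Decidable (Spec_stable_non_zero_first_py payload ordered_keys out) := by unfold Spec_stable_non_zero_first_py; infer_instance

-- ===== CLAIM (what is proved, stated in full; the proofs are below) =====
def Claim_equal_stable_non_zero_first_py : Prop := ∀ (payload : List (String × Int)) (ordered_keys : List String), Dom_stable_non_zero_first_py payload ordered_keys → Pre_stable_non_zero_first_py payload ordered_keys → Spec_stable_non_zero_first_py payload ordered_keys (stable_non_zero_first_py payload ordered_keys)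

-- ===== LEMMAS AND PROOFS =====

def pvVal (payload : List (String × Int)) (k : String) : Int := (PySem.Dict.mk payload).getD k 0
def pvG (payload : List (String × Int)) (k : String) : String × Int := (k, pvVal payload k)
def pvIdx (l : List String) (k : String) : Int := (((PySem.List.index? l k).getD 0 : Nat) : Int)
def pvP0 (payload : List (String × Int)) (k : String) : Bool :=
  (PySem.Dict.mk payload).contains k && (PySem.Dict.mk payload).getD k 0 != 0
def pvP1 (payload : List (String × Int)) (k : String) : Bool :=
  (PySem.Dict.mk payload).contains k && (PySem.Dict.mk payload).getD k 0 == 0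
def pvT0 (payload : List (String × Int)) (ok : List String) : List (String × Int) :=
  (PySem.Set.ofList (ok.filter (pvP0 payload))).map (pvG payload)
def pvT1 (payload : List (String × Int)) (ok : List String) : List (String × Int) :=
  (PySem.Set.ofList (ok.filter (pvP1 payload))).map (pvG payload)
def pvT2 (payload : List (String × Int)) (ok : List String) : List (String × Int) :=
  payload.filter (fun p => !(ok.contains p.1))
def pvPos (ok : List String) : PySem.Dict String Int :=
  (PySem.List.enumerate ok 0).foldl (fun p ik => p.setdefault ik.2 ik.1) PySem.Dict.empty

theorem pvVal_cons (a : String) (b : Int) (t : List (String × Int)) (k : String) :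
    pvVal ((a, b) :: t) k = if a = k then b else pvVal t k := by
  simp [pvVal, PySem.Dict.getD, PySem.Dict.get?_mk_cons]
  split_ifs <;> rfl

theorem valmap_filter (payload : List (String × Int)) (hN : (payload.map Prod.fst).Nodup)
    (q : String → Bool) :
    ((payload.map Prod.fst).filter q).map (pvG payload) = payload.filter (fun p => q p.1) := by
  induction payload with
  | nil => simp
  | cons p t ih =>
    obtain ⟨a, b⟩ := p
    simp only [List.map] at hN ⊢
    have ha : a ∉ t.map Prod.fst := (List.nodup_cons.mp hN).1
    have hN' := (List.nodup_cons.mp hN).2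
    have htail : ((t.map Prod.fst).filter q).map (pvG ((a, b) :: t))
        = ((t.map Prod.fst).filter q).map (pvG t) := by
      apply List.map_congr_left
      intro k hk
      have hkt : k ∈ t.map Prod.fst := List.mem_of_mem_filter hk
      have hne : a ≠ k := fun h => ha (h ▸ hkt)
      simp [pvG, pvVal_cons, hne]
    by_cases hq : q a
    · simp only [List.filter_cons, hq, if_pos, List.map_cons, htail, ih hN']
      simp [pvG, pvVal_cons]
    · simp only [List.filter_cons, hq, Bool.false_eq_true, if_neg, not_false_iff, htail, ih hN']

theorem loopIns (P : String → Bool) (v : String → Int) (l : List String)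
    (pre : List (String × Int)) (s : List String)
    (hpre : ∀ p ∈ pre, P p.1 = false) (hs : s.Nodup)
    (hdisj : ∀ k ∈ s, k ∉ pre.map Prod.fst) :
    (l.foldl (fun r k => if P k then r.insert k (v k) else r)
      (PySem.Dict.mk (pre ++ s.map (fun k => (k, v k))))).items
      = pre ++ (PySem.Set.update s (l.filter P)).map (fun k => (k, v k)) := by
  induction l generalizing s with
  | nil => simp [PySem.Set.update]
  | cons x t ih =>
    by_cases hP : P x
    · have hxpre : x ∉ pre.map Prod.fst := by
        intro hmem
        obtain ⟨p, hp, hp1⟩ := List.mem_map.mp hmem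
        have := hpre p hp
        rw [hp1, hP] at this
        exact absurd this (by simp)
      by_cases hmem : x ∈ s
      · have hc : (PySem.Dict.mk (pre ++ s.map (fun k => (k, v k)))).contains x = true := by
          rw [PySem.Dict.contains_mk]
          apply List.any_eq_true.mpr
          exact ⟨(x, v x), List.mem_append_right _ (List.mem_map_of_mem hmem), by simp⟩
        have hins : ((PySem.Dict.mk (pre ++ s.map (fun k => (k, v k)))).insert x (v x))
            = PySem.Dict.mk (pre ++ s.map (fun k => (k, v k))) := by
          apply PySem.Dict.ext
          rw [PySem.Dict.items_insert_of_contains _ _ hc]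
          show List.map _ (pre ++ s.map (fun k => (k, v k))) = _
          rw [List.map_append]
          congr 1
          · have hcong : ∀ p ∈ pre, (if (p.1 == x) = true then (x, v x) else p) = id p := by
              intro p hp
              have : p.1 ≠ x := fun h => hdisj x hmem (h ▸ List.mem_map_of_mem hp)
              simp [this]
            rw [List.map_congr_left hcong, List.map_id]
          · rw [List.map_map]
            apply List.map_congr_left
            intro k hk
            by_cases hkx : k = x <;> simp [Function.comp, hkx]
        have hadd : PySem.Set.add s x = s := by
          simp [PySem.Set.add, PySem.Set.contains, hmem]
        simp only [List.foldl_cons, hP, if_pos, hins, List.filter_cons,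
          PySem.Set.update_cons, hadd]
        exact ih s hs hdisj
      · have hc : (PySem.Dict.mk (pre ++ s.map (fun k => (k, v k)))).contains x = false := by
          rw [PySem.Dict.contains_mk]
          apply List.any_eq_false.mpr
          intro p hp
          rcases List.mem_append.mp hp with h | h
          · simp only [beq_iff_eq]
            exact fun he => hxpre (he ▸ List.mem_map_of_mem h)
          · obtain ⟨k, hk, rfl⟩ := List.mem_map.mp h
            simp only [beq_iff_eq]
            exact fun he => hmem (he ▸ hk)
        have hins : ((PySem.Dict.mk (pre ++ s.map (fun k => (k, v k)))).insert x (v x))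
            = PySem.Dict.mk (pre ++ (s ++ [x]).map (fun k => (k, v k))) := by
          apply PySem.Dict.ext
          rw [PySem.Dict.items_insert_of_not_contains _ _ hc]
          simp
        have hadd : PySem.Set.add s x = s ++ [x] := by
          simp [PySem.Set.add, PySem.Set.contains, hmem]
        simp only [List.foldl_cons, hP, if_pos, hins, List.filter_cons,
          PySem.Set.update_cons, hadd]
        apply ih (s ++ [x])
        · rw [List.nodup_append]
          refine ⟨hs, List.nodup_singleton x, ?_⟩
          intro a ha b hb
          simp at hb
          exact fun he => hmem ((he.trans hb) ▸ ha)
        · intro k hk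
          rcases List.mem_append.mp hk with h | h
          · exact hdisj k h
          · simp at h; exact h ▸ hxpre
    · simp only [List.foldl_cons, hP, List.filter_cons, Bool.false_eq_true, if_neg,
        not_false_iff]
      exact ih s hs hdisj

theorem mem_pvT01_key (payload : List (String × Int)) (ok : List String) (P : String → Bool)
    (p : String × Int) (hp : p ∈ (PySem.Set.ofList (ok.filter P)).map (pvG payload)) :
    p.1 ∈ ok ∧ P p.1 = true := by
  obtain ⟨k, hk, rfl⟩ := List.mem_map.mp hp
  have := (PySem.Set.mem_ofList _ _).mp hk
  exact ⟨List.mem_of_mem_filter this, List.of_mem_filter this⟩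

theorem A_char (payload : List (String × Int)) (ok : List String)
    (hN : (payload.map Prod.fst).Nodup) :
    stable_non_zero_first_py payload ok = pvT0 payload ok ++ pvT1 payload ok ++ pvT2 payload ok := by
  have h1 := loopIns (pvP0 payload) (pvVal payload) ok [] [] (by simp) List.nodup_nil (by simp)
  simp only [List.map_nil, List.append_nil, List.nil_append, PySem.Set.update_nil_left] at h1
  have e1 : (ok.foldl
      (fun r key => if (PySem.Dict.mk payload).contains key && (PySem.Dict.mk payload).getD key 0 != 0
        then r.insert key ((PySem.Dict.mk payload).getD key 0) else r) PySem.Dict.empty)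
      = PySem.Dict.mk (pvT0 payload ok) := PySem.Dict.ext h1
  have hpre2 : ∀ p ∈ pvT0 payload ok, pvP1 payload p.1 = false := by
    intro p hp
    have h := (mem_pvT01_key payload ok _ p hp).2
    simp only [pvP0, Bool.and_eq_true, bne_iff_ne, ne_eq] at h
    simp [pvP1, h.2]
  have h2 := loopIns (pvP1 payload) (pvVal payload) ok (pvT0 payload ok) [] hpre2
    List.nodup_nil (by simp)
  simp only [List.map_nil, List.append_nil, PySem.Set.update_nil_left] at h2
  have e2 : (ok.foldl
      (fun r key => if (PySem.Dict.mk payload).contains key && (PySem.Dict.mk payload).getD key 0 == 0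
        then r.insert key ((PySem.Dict.mk payload).getD key 0) else r) (PySem.Dict.mk (pvT0 payload ok)))
      = PySem.Dict.mk (pvT0 payload ok ++ pvT1 payload ok) := PySem.Dict.ext h2
  have h3 := PySem.Dict.items_foldl_insert_fresh
    (l := ((PySem.Dict.mk payload).keys.filter (fun key => !(ok.contains key))))
    (k := fun a => a) (v := fun a => (PySem.Dict.mk payload).getD a 0)
    (d := PySem.Dict.mk (pvT0 payload ok ++ pvT1 payload ok))
    (by
      intro a ha
      rw [PySem.Dict.contains_mk]
      apply List.any_eq_false.mpr
      intro p hp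
      have hpok : p.1 ∈ ok := by
        rcases List.mem_append.mp hp with h | h
        · exact (mem_pvT01_key payload ok _ p h).1
        · exact (mem_pvT01_key payload ok _ p h).1
      have haok : a ∉ ok := by
        have := List.of_mem_filter ha
        simpa using this
      simp only [beq_iff_eq]
      exact fun he => haok (he ▸ hpok)
    )
    (by
      simp only [List.map_id_fun', PySem.Dict.keys_mk]
      exact hN.filter _)
  have h4 : (((PySem.Dict.mk payload).keys.filter (fun key => !(ok.contains key))).map
      (fun a => (a, (PySem.Dict.mk payload).getD a 0))) = pvT2 payload ok := by
    rw [PySem.Dict.keys_mk]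
    exact valmap_filter payload hN _
  show (((PySem.Dict.mk payload).keys.filter (fun key => !(ok.contains key))).foldl
      (fun r key => r.insert key ((PySem.Dict.mk payload).getD key 0))
      (ok.foldl _ (ok.foldl _ PySem.Dict.empty))).items = _
  rw [e1, e2]
  rw [show (fun (r : PySem.Dict String Int) (key : String) => r.insert key ((PySem.Dict.mk payload).getD key 0))
      = (fun (d : PySem.Dict String Int) (a : String) => d.insert ((fun a => a) a) ((fun a => (PySem.Dict.mk payload).getD a 0) a)) from rfl]
  rw [h3, h4, List.append_assoc]

theorem enumerate_cons {α : Type} (x : α) (t : List α) (s : Int) :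
    PySem.List.enumerate (x :: t) s = (s, x) :: PySem.List.enumerate t (s + 1) := by
  simp [PySem.List.enumerate]

theorem pos_fold_get? (k : String) (l : List String) (s : Int) (p : PySem.Dict String Int) :
    ((PySem.List.enumerate l s).foldl (fun acc ik => acc.setdefault ik.2 ik.1) p).get? k
      = if p.contains k then p.get? k
        else (PySem.List.index? l k).map (fun n => ((n : Nat) : Int) + s) := by
  induction l generalizing s p with
  | nil =>
    rcases Bool.eq_false_or_eq_true (p.contains k) with hc | hc <;>
      simp [PySem.List.enumerate, hc, PySem.List.index?_eq_idxOf?, List.idxOf?]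
    rw [PySem.Dict.contains_eq_isSome_get?] at hc
    exact Option.not_isSome_iff_eq_none.mp (by simp [hc])
  | cons x t ih =>
    rw [enumerate_cons, List.foldl_cons, ih]
    by_cases hxk : x = k
    · subst hxk
      rcases Bool.eq_false_or_eq_true (p.contains x) with hc | hc
      · rw [PySem.Dict.setdefault_of_contains _ _ hc]
        simp [hc]
      · have hsd : p.setdefault x s = p.insert x s := PySem.Dict.setdefault_of_not_contains _ _ hc
        rw [hsd]
        have hct : (p.insert x s).contains x = true := by
          rw [PySem.Dict.contains_insert]; simp
        rw [if_pos hct, if_neg (by simp [hc]), PySem.Dict.get?_insert_self]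
        rw [PySem.List.index?_eq_idxOf?]
        simp [List.idxOf?, List.findIdx?_cons]
    · have hcc : (p.setdefault x s).contains k = p.contains k := by
        rw [PySem.Dict.contains_setdefault]
        simp [Ne.symm hxk]
      rw [hcc]
      rcases Bool.eq_false_or_eq_true (p.contains k) with hc | hc
      · simp only [hc, if_pos]
        exact PySem.Dict.get?_setdefault_of_ne _ _ (fun h => hxk h.symm)
      · simp only [hc, Bool.false_eq_true, if_neg, not_false_iff]
        rw [PySem.List.index?_cons_of_ne _ hxk]
        cases hI : PySem.List.index? t k with
        | none => simp
        | some n =>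
          simp only [Option.map_some]
          congr 1
          push_cast
          ring

theorem pvPos_get? (ok : List String) (k : String) :
    (pvPos ok).get? k = (PySem.List.index? ok k).map (fun n => ((n : Nat) : Int)) := by
  rw [pvPos, pos_fold_get?]
  simp [PySem.Dict.contains_empty]

theorem pvPos_contains (ok : List String) (k : String) :
    (pvPos ok).contains k = ok.contains k := by
  rw [PySem.Dict.contains_eq_isSome_get?, pvPos_get?]
  rw [PySem.List.index?_eq_idxOf?]
  cases hI : List.idxOf? k ok with
  | none =>
    have : k ∉ ok := by
      intro h
      have := List.isSome_idxOf?.mpr h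
      rw [hI] at this; simp at this
    simp [this]
  | some n =>
    have : k ∈ ok := by
      have := List.isSome_idxOf? (l := ok) (a := k)
      rw [hI] at this
      exact this.mp (by simp)
    simp [this]

theorem pvPos_getD (ok : List String) (k : String) (hk : k ∈ ok) :
    (pvPos ok).getD k 0 = pvIdx ok k := by
  rw [PySem.Dict.getD_eq_get?_getD, pvPos_get?, pvIdx]
  have := List.isSome_idxOf?.mpr hk
  rw [← PySem.List.index?_eq_idxOf?] at this
  cases hI : PySem.List.index? ok k with
  | none => rw [hI] at this; simp at this
  | some n => simp

theorem sorted2_eq_sorted_toLex {α : Type} (xs : List α) (k1 k2 : α → Int) :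
    PySem.List.sorted2 xs k1 k2 = PySem.List.sorted xs (fun x => toLex (k1 x, k2 x)) := by
  have hbef : ∀ a b : α, (decide (k1 a < k1 b) || (!decide (k1 b < k1 a) && decide (k2 a < k2 b)))
      = decide (toLex (k1 a, k2 a) < toLex (k1 b, k2 b)) := by
    intro a b
    rcases lt_trichotomy (k1 a) (k1 b) with h | h | h
    · simp [Prod.Lex.lt_iff, h, not_lt.mpr h.le]
    · simp [Prod.Lex.lt_iff, h, lt_irrefl]
    · simp [Prod.Lex.lt_iff, not_lt.mpr h.le, h.ne']
      intro h2
      exact absurd h2 (not_le.mpr h)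
  show List.foldl (fun acc x => PySem.List.insertBy
      (fun a b => decide (k1 a < k1 b) || (!decide (k1 b < k1 a) && decide (k2 a < k2 b))) x acc) [] xs
    = List.foldl (fun acc x => PySem.List.insertBy
      (fun a b => decide (toLex (k1 a, k2 a) < toLex (k1 b, k2 b))) x acc) [] xs
  congr 1
  funext acc x
  congr 1
  funext a b
  exact hbef a b

theorem enumerate_le {α : Type} (l : List α) (s : Int) :
    ∀ y ∈ PySem.List.enumerate l s, s ≤ y.1 := by
  induction l generalizing s with
  | nil => simp [PySem.List.enumerate]
  | cons x t ih =>
    intro y hy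
    rw [show PySem.List.enumerate (x :: t) s = (s, x) :: PySem.List.enumerate t (s + 1) by
      simp [PySem.List.enumerate]] at hy
    rcases List.mem_cons.mp hy with rfl | h
    · rfl
    · have := ih (s + 1) y h
      omega

theorem enumerate_pairwise_fst {α : Type} (l : List α) (s : Int) :
    (PySem.List.enumerate l s).Pairwise (fun a b => a.1 < b.1) := by
  induction l generalizing s with
  | nil => simp [PySem.List.enumerate]
  | cons x t ih =>
    rw [show PySem.List.enumerate (x :: t) s = (s, x) :: PySem.List.enumerate t (s + 1) by
      simp [PySem.List.enumerate]]
    refine List.pairwise_cons.mpr ⟨?_, ih (s + 1)⟩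
    intro y hy
    have := enumerate_le t (s + 1) y hy
    simp only
    omega

theorem enumerate_filter_map_snd {α : Type} (q : α → Bool) (l : List α) (s : Int) :
    (((PySem.List.enumerate l s).filter (fun ip => q ip.2)).map (fun x => x.2)) = l.filter q := by
  induction l generalizing s with
  | nil => simp [PySem.List.enumerate]
  | cons x t ih =>
    rw [show PySem.List.enumerate (x :: t) s = (s, x) :: PySem.List.enumerate t (s + 1) by
      simp [PySem.List.enumerate]]
    by_cases hq : q x <;> simp [List.filter_cons, hq, ih]

theorem ofList_cons {α : Type} [BEq α] [LawfulBEq α] (x : α) (t : List α) :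
    PySem.Set.ofList (x :: t) = x :: (PySem.Set.ofList t).filter (fun y => !(y == x)) := by
  rw [PySem.Set.ofList_eq_foldl, List.foldl_cons]
  have h1 : PySem.Set.add [] x = [x] := by simp [PySem.Set.add, PySem.Set.contains]
  rw [h1]
  have h2 : List.foldl PySem.Set.add [x] t = PySem.Set.update [x] t := rfl
  rw [h2, PySem.Set.update_eq_append_filter]
  simp [PySem.Set.contains]

theorem ofList_filter {α : Type} [BEq α] [LawfulBEq α] (P : α → Bool) (l : List α) :
    PySem.Set.ofList (l.filter P) = (PySem.Set.ofList l).filter P := by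
  induction l with
  | nil => simp [PySem.Set.ofList]
  | cons x t ih =>
    by_cases hP : P x
    · rw [List.filter_cons_of_pos hP, ofList_cons, ofList_cons, List.filter_cons_of_pos hP, ih,
        List.filter_comm]
    · rw [List.filter_cons_of_neg (by simp [hP]), ofList_cons, List.filter_cons_of_neg hP, ih,
        List.filter_filter]
      apply List.filter_congr
      intro y _
      by_cases hyx : y = x
      · subst hyx
        simp [hP]
      · simp [beq_eq_false_iff_ne.mpr hyx]

theorem pairwise_idx_ofList (l : List String) :
    (PySem.Set.ofList l).Pairwise (fun a b => pvIdx l a < pvIdx l b) := by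
  induction l with
  | nil => simp [PySem.Set.ofList]
  | cons x t ih =>
    rw [ofList_cons]
    refine List.pairwise_cons.mpr ⟨?_, ?_⟩
    · intro y hy
      have hyt : y ∈ t := (PySem.Set.mem_ofList _ _).mp (List.mem_of_mem_filter hy)
      have hyx : y ≠ x := by
        have := List.of_mem_filter hy
        simpa using this
      have hxx : pvIdx (x :: t) x = 0 := by
        simp [pvIdx, PySem.List.index?_eq_idxOf?, List.idxOf?, List.findIdx?_cons]
      have hsome := List.isSome_idxOf?.mpr hyt
      rw [← PySem.List.index?_eq_idxOf?] at hsome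
      rw [hxx, pvIdx, PySem.List.index?_cons_of_ne _ (fun h => hyx h.symm)]
      cases hI : PySem.List.index? t y with
      | none => rw [hI] at hsome; simp at hsome
      | some n => simp
    · refine List.Pairwise.imp_of_mem ?_ (List.Pairwise.sublist List.filter_sublist ih)
      intro a b ha hb hab
      have hax : a ≠ x := by have := List.of_mem_filter ha; simpa using this
      have hbx : b ≠ x := by have := List.of_mem_filter hb; simpa using this
      have hat : a ∈ t := (PySem.Set.mem_ofList _ _).mp (List.mem_of_mem_filter ha)
      have hbt : b ∈ t := (PySem.Set.mem_ofList _ _).mp (List.mem_of_mem_filter hb)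
      have hsa := List.isSome_idxOf?.mpr hat
      have hsb := List.isSome_idxOf?.mpr hbt
      rw [← PySem.List.index?_eq_idxOf?] at hsa hsb
      rw [pvIdx, pvIdx, PySem.List.index?_cons_of_ne _ (fun h => hax h.symm),
        PySem.List.index?_cons_of_ne _ (fun h => hbx h.symm)]
      rw [pvIdx, pvIdx] at hab
      cases hIa : PySem.List.index? t a with
      | none => rw [hIa] at hsa; simp at hsa
      | some m =>
        cases hIb : PySem.List.index? t b with
        | none => rw [hIb] at hsb; simp at hsb
        | some n =>
          rw [hIa, hIb] at hab
          simp at hab ⊢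
          omega

theorem idx_cons_of_mem (a k : String) (tk : List String) (hkt : k ∈ tk) (hak : ¬ a = k) :
    pvIdx (a :: tk) k = pvIdx tk k + 1 := by
  have hsome := List.isSome_idxOf?.mpr hkt
  rw [← PySem.List.index?_eq_idxOf?] at hsome
  rw [pvIdx, pvIdx, PySem.List.index?_cons_of_ne _ hak]
  cases hI : PySem.List.index? tk k with
  | none => rw [hI] at hsome; simp at hsome
  | some n => simp

theorem enumFilterEq (r : (String × Int) → Bool) (payload : List (String × Int))
    (hN : (payload.map Prod.fst).Nodup) (s : Int) :
    (PySem.List.enumerate payload s).filter (fun ip => r ip.2)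
      = ((payload.map Prod.fst).filter (fun k => r (k, pvVal payload k))).map
          (fun k => (pvIdx (payload.map Prod.fst) k + s, (k, pvVal payload k))) := by
  induction payload generalizing s with
  | nil => simp [PySem.List.enumerate]
  | cons p t ih =>
    obtain ⟨a, b⟩ := p
    rw [List.map_cons, List.nodup_cons] at hN
    obtain ⟨ha, hN'⟩ := hN
    have hvala : pvVal ((a, b) :: t) a = b := by
      simp [pvVal, PySem.Dict.getD, PySem.Dict.get?_mk_cons]
    have hvalt : ∀ k ∈ t.map Prod.fst, pvVal ((a, b) :: t) k = pvVal t k := by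
      intro k hk
      have : (a == k) = false := beq_eq_false_iff_ne.mpr (fun h => ha (h ▸ hk))
      simp [pvVal, PySem.Dict.getD, PySem.Dict.get?_mk_cons, this]
    have hidxa : pvIdx (a :: t.map Prod.fst) a = 0 := by
      simp [pvIdx, PySem.List.index?_eq_idxOf?, List.idxOf?, List.findIdx?_cons]
    have htail : (PySem.List.enumerate t (s + 1)).filter (fun ip => r ip.2)
        = ((t.map Prod.fst).filter (fun k => r (k, pvVal ((a, b) :: t) k))).map
            (fun k => (pvIdx (a :: t.map Prod.fst) k + s, (k, pvVal ((a, b) :: t) k))) := by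
      rw [ih hN' (s + 1)]
      rw [List.filter_congr (fun k hk => by
        show r (k, pvVal t k) = r (k, pvVal ((a, b) :: t) k)
        rw [hvalt k hk] : ∀ k ∈ t.map Prod.fst,
        (fun k => r (k, pvVal t k)) k = (fun k => r (k, pvVal ((a, b) :: t) k)) k)]
      apply List.map_congr_left
      intro k hk
      have hkt : k ∈ t.map Prod.fst := List.mem_of_mem_filter hk
      have hak : ¬ a = k := fun h => ha (h ▸ hkt)
      rw [idx_cons_of_mem a k _ hkt hak, hvalt k hkt]
      congr 1
      ring
    rw [show PySem.List.enumerate ((a, b) :: t) s = (s, (a, b)) :: PySem.List.enumerate t (s + 1) by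
      simp [PySem.List.enumerate]]
    rw [List.map_cons, List.filter_cons, List.filter_cons]
    by_cases hr : r (a, b)
    · rw [if_pos (by simpa using hr), if_pos (by rw [hvala]; simpa using hr), List.map_cons]
      rw [htail, hidxa, hvala]
      simp
    · rw [if_neg (by simpa using hr), if_neg (by rw [hvala]; simpa using hr)]
      exact htail

-- ofList returns a nodup-key pair list unchanged
theorem items_ofList_nodup (l : List (String × Int)) (hN : (l.map Prod.fst).Nodup) :
    (PySem.Dict.ofList l).items = l := by
  show (l.foldl (fun acc p => acc.insert p.1 p.2) PySem.Dict.empty).items = l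
  rw [PySem.Dict.items_foldl_insert_fresh l Prod.fst Prod.snd PySem.Dict.empty
    (fun a _ => PySem.Dict.contains_empty _) hN]
  simp [PySem.Dict.empty]

-- contains (Dict.mk payload) k = k ∈ keys
theorem contains_mk_iff (payload : List (String × Int)) (k : String) :
    (PySem.Dict.mk payload).contains k = true ↔ k ∈ payload.map Prod.fst := by
  rw [PySem.Dict.contains_mk, List.any_eq_true]
  constructor
  · rintro ⟨p, hp, hpk⟩
    exact (beq_iff_eq.mp hpk) ▸ List.mem_map_of_mem hp
  · intro h
    obtain ⟨p, hp, rfl⟩ := List.mem_map.mp h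
    exact ⟨p, hp, beq_iff_eq.mpr rfl⟩

def pvK1 (ok : List String) (x : Int × (String × Int)) : Int :=
  if ok.contains x.2.1 then (if x.2.2 != 0 then 0 else 1) else 2
def pvK2 (ok : List String) (x : Int × (String × Int)) : Int :=
  if ok.contains x.2.1 then pvIdx ok x.2.1 else x.1

theorem B_port_eq (payload : List (String × Int)) (ok : List String) :
    stable_non_zero_first_py_alt payload ok
      = (PySem.Dict.ofList
          ((PySem.List.sorted2 (PySem.List.enumerate payload 0) (pvK1 ok) (pvK2 ok)).map
            (fun x => x.2))).items := by
  have hs2 : PySem.List.sorted2 (PySem.List.enumerate payload 0)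
        (fun item : Int × (String × Int) =>
          if (pvPos ok).contains item.2.1 then (if item.2.2 != 0 then (0:Int) else 1) else 2)
        (fun item : Int × (String × Int) =>
          if (pvPos ok).contains item.2.1 then (pvPos ok).getD item.2.1 0 else item.1)
      = PySem.List.sorted2 (PySem.List.enumerate payload 0) (pvK1 ok) (pvK2 ok) := by
    congr 1
    · funext x
      rw [pvK1, pvPos_contains]
    · funext x
      rw [pvK2, pvPos_contains]
      by_cases hc : ok.contains x.2.1
      · rw [if_pos hc, if_pos hc, pvPos_getD ok _ (List.contains_iff_mem.mp hc)]
      · have : x.2.1 ∉ ok := fun h => hc (List.contains_iff_mem.mpr h)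
        rw [if_neg (by simpa using this), if_neg (by simpa using this)]
  show (PySem.Dict.ofList
      ((PySem.List.sorted2 (PySem.List.enumerate payload 0)
        (fun item => if (pvPos ok).contains item.2.1 then (if item.2.2 != 0 then 0 else 1) else 2)
        (fun item => if (pvPos ok).contains item.2.1 then (pvPos ok).getD item.2.1 0 else item.1)).map
        (fun x => x.2))).items = _
  rw [hs2]

def pvM0 (payload : List (String × Int)) (ok : List String) : List (Int × (String × Int)) :=
  (PySem.Set.ofList (ok.filter (pvP0 payload))).map
    (fun k => (pvIdx (payload.map Prod.fst) k, pvG payload k))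
def pvM1 (payload : List (String × Int)) (ok : List String) : List (Int × (String × Int)) :=
  (PySem.Set.ofList (ok.filter (pvP1 payload))).map
    (fun k => (pvIdx (payload.map Prod.fst) k, pvG payload k))
def pvE2 (payload : List (String × Int)) (ok : List String) : List (Int × (String × Int)) :=
  (PySem.List.enumerate payload 0).filter (fun ip => !(ok.contains ip.2.1))

theorem K_perm (payload : List (String × Int)) (ok : List String)
    (hN : (payload.map Prod.fst).Nodup) (P : String → Bool)
    (hP : ∀ k, P k = true → (PySem.Dict.mk payload).contains k = true) (w : Int → Bool)
    (hw : ∀ k, P k = ((PySem.Dict.mk payload).contains k && w (pvVal payload k))) :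
    (PySem.Set.ofList (ok.filter P)).Perm
      ((payload.map Prod.fst).filter (fun k => ok.contains k && w (pvVal payload k))) := by
  rw [List.perm_ext_iff_of_nodup (PySem.Set.nodup_ofList _) (hN.filter _)]
  intro k
  rw [PySem.Set.mem_ofList, List.mem_filter, List.mem_filter, Bool.and_eq_true,
    List.contains_iff_mem, hw k, Bool.and_eq_true]
  constructor
  · rintro ⟨hok, hc, hwv⟩
    exact ⟨(contains_mk_iff payload k).mp hc, hok, hwv⟩
  · rintro ⟨hkys, hok, hwv⟩
    exact ⟨hok, (contains_mk_iff payload k).mpr hkys, hwv⟩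

theorem M_perm_all (payload : List (String × Int)) (ok : List String)
    (hN : (payload.map Prod.fst).Nodup) :
    (pvM0 payload ok ++ pvM1 payload ok ++ pvE2 payload ok).Perm
      (PySem.List.enumerate payload 0) := by
  have hF0 := enumFilterEq (fun p => ok.contains p.1 && p.2 != 0) payload hN 0
  have hF1 := enumFilterEq (fun p => ok.contains p.1 && p.2 == 0) payload hN 0
  simp only [add_zero] at hF0 hF1
  have hM0 : (pvM0 payload ok).Perm
      ((PySem.List.enumerate payload 0).filter (fun ip => ok.contains ip.2.1 && ip.2.2 != 0)) := by
    rw [hF0]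
    exact (K_perm payload ok hN (pvP0 payload) (fun k h => (Bool.and_eq_true _ _ |>.mp h).1)
      (fun v => v != 0) (fun k => rfl)).map _
  have hM1 : (pvM1 payload ok).Perm
      ((PySem.List.enumerate payload 0).filter (fun ip => ok.contains ip.2.1 && ip.2.2 == 0)) := by
    rw [hF1]
    exact (K_perm payload ok hN (pvP1 payload) (fun k h => (Bool.and_eq_true _ _ |>.mp h).1)
      (fun v => v == 0) (fun k => rfl)).map _
  have p1 := List.filter_append_perm (fun ip : Int × (String × Int) => ok.contains ip.2.1)
    (PySem.List.enumerate payload 0)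
  have p2 := List.filter_append_perm (fun ip : Int × (String × Int) => ip.2.2 != 0)
    ((PySem.List.enumerate payload 0).filter (fun ip => ok.contains ip.2.1))
  rw [List.filter_filter, List.filter_filter] at p2
  have e0 : ((PySem.List.enumerate payload 0).filter (fun a => (a.2.2 != 0) && ok.contains a.2.1))
      = ((PySem.List.enumerate payload 0).filter (fun ip => ok.contains ip.2.1 && ip.2.2 != 0)) := by
    apply List.filter_congr; intro a _; exact Bool.and_comm _ _
  have e1 : ((PySem.List.enumerate payload 0).filter (fun a => (!(a.2.2 != 0)) && ok.contains a.2.1))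
      = ((PySem.List.enumerate payload 0).filter (fun ip => ok.contains ip.2.1 && ip.2.2 == 0)) := by
    apply List.filter_congr; intro a _; simp [bne, Bool.and_comm]
  rw [e0, e1] at p2
  have step1 : (pvM0 payload ok ++ pvM1 payload ok ++ pvE2 payload ok).Perm
      (((PySem.List.enumerate payload 0).filter (fun ip => ok.contains ip.2.1 && ip.2.2 != 0)
        ++ (PySem.List.enumerate payload 0).filter (fun ip => ok.contains ip.2.1 && ip.2.2 == 0))
        ++ pvE2 payload ok) :=
    (hM0.append hM1).append (List.Perm.refl _)
  have step2 : ((((PySem.List.enumerate payload 0).filter (fun ip => ok.contains ip.2.1 && ip.2.2 != 0)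
        ++ (PySem.List.enumerate payload 0).filter (fun ip => ok.contains ip.2.1 && ip.2.2 == 0)))
        ++ pvE2 payload ok).Perm
      (((PySem.List.enumerate payload 0).filter (fun ip => ok.contains ip.2.1)) ++ pvE2 payload ok) :=
    p2.append (List.Perm.refl _)
  have step3 : (((PySem.List.enumerate payload 0).filter (fun ip => ok.contains ip.2.1))
        ++ pvE2 payload ok).Perm (PySem.List.enumerate payload 0) := by
    have he : pvE2 payload ok
        = (PySem.List.enumerate payload 0).filter
            (fun x => !(fun ip : Int × (String × Int) => ok.contains ip.2.1) x) := rfl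
    rw [he]
    exact p1
  exact step1.trans (step2.trans step3)

theorem memM_facts (payload : List (String × Int)) (ok : List String) (P : String → Bool)
    (x : Int × (String × Int))
    (hx : x ∈ (PySem.Set.ofList (ok.filter P)).map
      (fun k => (pvIdx (payload.map Prod.fst) k, pvG payload k))) :
    x.2.1 ∈ ok ∧ P x.2.1 = true ∧ x.2.2 = pvVal payload x.2.1 ∧ pvK2 ok x = pvIdx ok x.2.1 := by
  obtain ⟨k, hk, rfl⟩ := List.mem_map.mp hx
  have hk' := (PySem.Set.mem_ofList _ _).mp hk
  have hok : k ∈ ok := List.mem_of_mem_filter hk'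
  refine ⟨hok, List.of_mem_filter hk', rfl, ?_⟩
  rw [pvK2]
  simp only [pvG]
  rw [if_pos (List.contains_iff_mem.mpr hok)]

theorem memM0_k1 (payload : List (String × Int)) (ok : List String) (x : Int × (String × Int))
    (hx : x ∈ pvM0 payload ok) : pvK1 ok x = 0 := by
  obtain ⟨hok, hP, hval, _⟩ := memM_facts payload ok _ x hx
  rw [pvK1, if_pos (List.contains_iff_mem.mpr hok), if_pos]
  rw [hval]
  have := (Bool.and_eq_true _ _).mp hP
  exact this.2

theorem memM1_k1 (payload : List (String × Int)) (ok : List String) (x : Int × (String × Int))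
    (hx : x ∈ pvM1 payload ok) : pvK1 ok x = 1 := by
  obtain ⟨hok, hP, hval, _⟩ := memM_facts payload ok _ x hx
  rw [pvK1, if_pos (List.contains_iff_mem.mpr hok), if_neg]
  rw [hval]
  have h2 := ((Bool.and_eq_true _ _).mp hP).2
  simp only [beq_iff_eq] at h2
  show ¬ (pvVal payload x.2.1 != 0) = true
  simp [pvVal, h2]

theorem memE2_facts (payload : List (String × Int)) (ok : List String) (x : Int × (String × Int))
    (hx : x ∈ pvE2 payload ok) : pvK1 ok x = 2 ∧ pvK2 ok x = x.1 := by
  have h := List.of_mem_filter hx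
  have : ¬ ok.contains x.2.1 = true := by simpa using h
  constructor
  · rw [pvK1, if_neg this]
  · rw [pvK2, if_neg this]

theorem M_pairwise (payload : List (String × Int)) (ok : List String) :
    (pvM0 payload ok ++ pvM1 payload ok ++ pvE2 payload ok).Pairwise
      (fun a b => (toLex (pvK1 ok a, pvK2 ok a)) < (toLex (pvK1 ok b, pvK2 ok b))) := by
  have hidx := pairwise_idx_ofList ok
  have hintra : ∀ (P : String → Bool),
      ((PySem.Set.ofList (ok.filter P)).map
        (fun k => (pvIdx (payload.map Prod.fst) k, pvG payload k))).Pairwise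
        (fun a b => pvK2 ok a < pvK2 ok b) := by
    intro P
    apply List.pairwise_map.mpr
    have hsub : (PySem.Set.ofList (ok.filter P)).Pairwise (fun a b => pvIdx ok a < pvIdx ok b) := by
      rw [ofList_filter]
      exact List.Pairwise.sublist List.filter_sublist hidx
    refine hsub.imp_of_mem ?_
    intro a b ha hb hab
    have hamem : a ∈ ok := List.mem_of_mem_filter ((PySem.Set.mem_ofList _ _).mp ha)
    have hbmem : b ∈ ok := List.mem_of_mem_filter ((PySem.Set.mem_ofList _ _).mp hb)
    simp only [pvK2, pvG]
    rw [if_pos (List.contains_iff_mem.mpr hamem), if_pos (List.contains_iff_mem.mpr hbmem)]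
    exact hab
  have hlex_right : ∀ (a b : Int × (String × Int)), pvK1 ok a = pvK1 ok b →
      pvK2 ok a < pvK2 ok b → toLex (pvK1 ok a, pvK2 ok a) < toLex (pvK1 ok b, pvK2 ok b) :=
    fun a b h1 h2 => Prod.Lex.lt_iff.mpr (Or.inr ⟨h1, h2⟩)
  have hlex_left : ∀ (a b : Int × (String × Int)), pvK1 ok a < pvK1 ok b →
      toLex (pvK1 ok a, pvK2 ok a) < toLex (pvK1 ok b, pvK2 ok b) :=
    fun a b h1 => Prod.Lex.lt_iff.mpr (Or.inl h1)
  rw [List.append_assoc, List.pairwise_append]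
  refine ⟨?_, ?_, ?_⟩
  · exact (hintra (pvP0 payload)).imp_of_mem (fun {a b} ha hb h => hlex_right a b
      (by rw [memM0_k1 payload ok a ha, memM0_k1 payload ok b hb]) h)
  · rw [List.pairwise_append]
    refine ⟨?_, ?_, ?_⟩
    · exact (hintra (pvP1 payload)).imp_of_mem (fun {a b} ha hb h => hlex_right a b
        (by rw [memM1_k1 payload ok a ha, memM1_k1 payload ok b hb]) h)
    · have hp := enumerate_pairwise_fst payload (0 : Int)
      refine (List.Pairwise.sublist List.filter_sublist hp).imp_of_mem ?_
      intro a b ha hb h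
      apply hlex_right a b
      · rw [(memE2_facts payload ok a ha).1, (memE2_facts payload ok b hb).1]
      · rw [(memE2_facts payload ok a ha).2, (memE2_facts payload ok b hb).2]
        exact h
    · intro a ha b hb
      apply hlex_left a b
      rw [memM1_k1 payload ok a ha, (memE2_facts payload ok b hb).1]
      norm_num
  · intro a ha b hb
    apply hlex_left a b
    rw [memM0_k1 payload ok a ha]
    rcases List.mem_append.mp hb with h | h
    · rw [memM1_k1 payload ok b h]; norm_num
    · rw [(memE2_facts payload ok b h).1]; norm_num

theorem keysT_nodup (payload : List (String × Int)) (ok : List String)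
    (hN : (payload.map Prod.fst).Nodup) :
    (((pvT0 payload ok ++ pvT1 payload ok ++ pvT2 payload ok)).map Prod.fst).Nodup := by
  have h0 : (pvT0 payload ok).map Prod.fst = PySem.Set.ofList (ok.filter (pvP0 payload)) := by
    rw [pvT0, List.map_map]
    exact (List.map_congr_left (fun k _ => rfl)).trans (List.map_id _)
  have h1 : (pvT1 payload ok).map Prod.fst = PySem.Set.ofList (ok.filter (pvP1 payload)) := by
    rw [pvT1, List.map_map]
    exact (List.map_congr_left (fun k _ => rfl)).trans (List.map_id _)
  have h2 : (pvT2 payload ok).map Prod.fst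
      = (payload.map Prod.fst).filter (fun k => !(ok.contains k)) := by
    rw [pvT2]
    have := valmap_filter payload hN (fun k => !(ok.contains k))
    rw [← this, List.map_map]
    exact (List.map_congr_left (fun k _ => rfl)).trans (List.map_id _)
  rw [List.map_append, List.map_append, h0, h1, h2]
  have hval0 : ∀ a ∈ PySem.Set.ofList (ok.filter (pvP0 payload)), pvVal payload a ≠ 0 := by
    intro a ha
    have := List.of_mem_filter ((PySem.Set.mem_ofList _ _).mp ha)
    have h := ((Bool.and_eq_true _ _).mp this).2
    simpa [pvVal] using h
  have hval1 : ∀ a ∈ PySem.Set.ofList (ok.filter (pvP1 payload)), pvVal payload a = 0 := by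
    intro a ha
    have := List.of_mem_filter ((PySem.Set.mem_ofList _ _).mp ha)
    have h := ((Bool.and_eq_true _ _).mp this).2
    simpa [pvVal] using h
  have hok0 : ∀ a ∈ PySem.Set.ofList (ok.filter (pvP0 payload)), a ∈ ok :=
    fun a ha => List.mem_of_mem_filter ((PySem.Set.mem_ofList _ _).mp ha)
  have hok1 : ∀ a ∈ PySem.Set.ofList (ok.filter (pvP1 payload)), a ∈ ok :=
    fun a ha => List.mem_of_mem_filter ((PySem.Set.mem_ofList _ _).mp ha)
  have hnok2 : ∀ b ∈ (payload.map Prod.fst).filter (fun k => !(ok.contains k)), b ∉ ok := by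
    intro b hb
    have := List.of_mem_filter hb
    simpa using this
  rw [List.append_assoc, List.nodup_append]
  refine ⟨PySem.Set.nodup_ofList _, ?_, ?_⟩
  · rw [List.nodup_append]
    refine ⟨PySem.Set.nodup_ofList _, hN.filter _, ?_⟩
    intro a ha b hb
    exact fun he => (hnok2 b hb) (he ▸ hok1 a ha)
  · intro a ha b hb
    rcases List.mem_append.mp hb with h | h
    · intro he
      exact (hval0 a ha) (he ▸ hval1 b h)
    · exact fun he => (hnok2 b h) (he ▸ hok0 a ha)

theorem B_char (payload : List (String × Int)) (ok : List String)
    (hN : (payload.map Prod.fst).Nodup) :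
    stable_non_zero_first_py_alt payload ok = pvT0 payload ok ++ pvT1 payload ok ++ pvT2 payload ok := by
  rw [B_port_eq]
  have hsorted : PySem.List.sorted2 (PySem.List.enumerate payload 0) (pvK1 ok) (pvK2 ok)
      = pvM0 payload ok ++ pvM1 payload ok ++ pvE2 payload ok := by
    rw [sorted2_eq_sorted_toLex]
    exact PySem.List.sorted_eq_of_perm_of_pairwise_lt _ _ _
      (M_perm_all payload ok hN) (M_pairwise payload ok)
  rw [hsorted]
  have hm0 : (pvM0 payload ok).map (fun x => x.2) = pvT0 payload ok := by
    rw [pvM0, pvT0, List.map_map]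
    rfl
  have hm1 : (pvM1 payload ok).map (fun x => x.2) = pvT1 payload ok := by
    rw [pvM1, pvT1, List.map_map]
    rfl
  have hm2 : (pvE2 payload ok).map (fun x => x.2) = pvT2 payload ok := by
    rw [pvE2, pvT2]
    exact enumerate_filter_map_snd (fun p : String × Int => !(ok.contains p.1)) payload 0
  rw [List.map_append, List.map_append, hm0, hm1, hm2]
  exact items_ofList_nodup _ (keysT_nodup payload ok hN)

-- ===== VERDICT (by name: the statement is the Claim_ definition above) =====
theorem stable_non_zero_first_py_spec : Claim_equal_stable_non_zero_first_py := by
  intro payload ok _ hpre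
  unfold Spec_stable_non_zero_first_py
  rw [A_char payload ok hpre, B_char payload ok hpre]
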